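-- pv_equiv track=rewrite | github.com/Leon2911/BT-Gametheoretic-Evaluation-ML-Algorithms | Main/Matchmakingschemes/MatchmakingScheme.py | calculate_grid_size
-- ===== SOURCE A (Python) =====
-- import math
--
-- def calculate_grid_size(num_agents: int) -> tuple[int, int]:
--     """
--     Berechnet die bestmögliche, möglichst quadratische Gittergröße für eine
--     gegebene Anzahl von Agenten.
--
--     Args:
--         num_agents: Die Gesamtzahl der Agenten.
--
--     Returns:
--         Ein Tupel (rows, cols), das die Gitterdimensionen darstellt.
--     """
--     if num_agents <= 0:
--         return 0, 0
--     # Beginne mit der Wurzel, um die quadratischste Form zu finden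
--     rows = int(math.sqrt(num_agents))
--     # Finde den größten Teiler, der kleiner oder gleich der Wurzel ist
--     while num_agents % rows != 0:
--         rows -= 1
--     cols = num_agents // rows
--     return rows, cols
-- ===== SOURCE B (Python) =====
-- import math
--
-- def calculate_grid_size(num_agents: int) -> tuple[int, int]:
--     if num_agents <= 0:
--         return 0, 0
--     r = int(math.sqrt(num_agents))
--     best = 1
--     for i in range(1, r + 1):
--         if num_agents % i == 0:
--             best = i
--     return best, num_agents // best
-- ===== Notes on version B (the rewrite author's own statement) =====
-- stated objective: alternative
-- what changed: Replaces A's descending while-loop that stops at the first divisor below int(sqrt(n)) with an ascending full scan from 1 to int(sqrt(n)) that maintains a running largest divisor in an accumulator.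
import Mathlib
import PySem

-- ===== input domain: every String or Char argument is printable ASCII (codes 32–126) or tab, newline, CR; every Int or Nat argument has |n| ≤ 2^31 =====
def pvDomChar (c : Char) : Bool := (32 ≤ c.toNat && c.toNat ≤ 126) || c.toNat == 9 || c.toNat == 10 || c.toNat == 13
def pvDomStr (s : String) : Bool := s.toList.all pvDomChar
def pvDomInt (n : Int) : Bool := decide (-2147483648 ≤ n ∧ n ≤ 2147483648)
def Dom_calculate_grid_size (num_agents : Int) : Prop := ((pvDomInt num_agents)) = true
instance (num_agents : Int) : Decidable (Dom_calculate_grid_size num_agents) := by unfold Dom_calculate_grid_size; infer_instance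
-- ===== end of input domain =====

-- B replaces A's descending stop-at-first-divisor loop with an ascending full scan
-- keeping a running largest divisor (objective: alternative; same cost).
-- In both ports int(math.sqrt(num_agents)) is ported as Nat.sqrt: for 0 < n ≤ 2^31 the
-- correctly rounded double sqrt never crosses an integer boundary, so it is exact there.

-- ===== PORT A =====
-- the 'while num_agents % rows != 0: rows -= 1' loop, as structural recursion on rows
-- (the loop always terminates at rows ≥ 1 since 1 divides num_agents; the 0 case is unreachable)
def pvWhileDown (n : Int) : Nat → Nat
  | 0 => 0
  | r + 1 => if n % ((r : Int) + 1) = 0 then r + 1 else pvWhileDown n r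

def calculate_grid_size (num_agents : Int) : Int × Int :=
  if num_agents ≤ 0 then (0, 0)
  else
    let rows : Nat := Nat.sqrt num_agents.toNat      -- int(math.sqrt(num_agents)), exact on Dom
    let rows' : Nat := pvWhileDown num_agents rows
    ((rows' : Int), PySem.Int.floordiv num_agents (rows' : Int))

-- ===== PORT B =====
def calculate_grid_size_alt (num_agents : Int) : Int × Int :=
  if num_agents ≤ 0 then (0, 0)
  else
    let r : Int := (Nat.sqrt num_agents.toNat : Int) -- int(math.sqrt(num_agents)), exact on Dom
    let best : Int :=
      (PySem.List.pyRange 1 (r + 1) 1).foldl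
        (fun best i => if num_agents % i = 0 then i else best) 1
    (best, PySem.Int.floordiv num_agents best)

-- ===== PRECONDITION & SPEC =====
def Spec_calculate_grid_size (num_agents : Int) (out : Int × Int) : Prop := out = calculate_grid_size_alt num_agents
instance (num_agents : Int) (out : Int × Int) : Decidable (Spec_calculate_grid_size num_agents out) := by unfold Spec_calculate_grid_size; infer_instance

-- ===== CLAIM (what is proved, stated in full; the proofs are below) =====
def Claim_equal_calculate_grid_size : Prop := ∀ (num_agents : Int), Dom_calculate_grid_size num_agents → Spec_calculate_grid_size num_agents (calculate_grid_size num_agents)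

-- ===== LEMMAS AND PROOFS =====

-- the ascending accumulator scan up to r computes the same value as the descending
-- first-divisor search from r, for every r ≥ 1
theorem pv_scan_eq (n : Int) : ∀ r : Nat, 1 ≤ r →
    (PySem.List.pyRange 1 ((r : Int) + 1) 1).foldl
      (fun best i => if n % i = 0 then i else best) 1 = ((pvWhileDown n r : Nat) : Int) := by
  intro r
  induction r with
  | zero => intro h; omega
  | succ s ih =>
    intro _
    by_cases hs : 1 ≤ s
    · have hsplit : PySem.List.pyRange 1 ((s : Int) + 1 + 1) 1
          = PySem.List.pyRange 1 ((s : Int) + 1) 1 ++ [(s : Int) + 1] := by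
        have := PySem.List.pyRange_one_succ_right (a := 1) (b := (s : Int) + 1) (by omega)
        simpa using this
      rw [show ((s + 1 : Nat) : Int) + 1 = (s : Int) + 1 + 1 by push_cast; ring, hsplit,
        List.foldl_append, ih hs]
      simp only [List.foldl, pvWhileDown]
      split_ifs with h
      · push_cast; ring
      · rfl
    · -- s = 0 : range is [1], and 1 divides n
      have hs0 : s = 0 := by omega
      subst hs0
      have h12 : PySem.List.pyRange 1 2 1 = [1] := by decide
      simp [pvWhileDown, h12]

-- ===== VERDICT (by name: the statement is the Claim_ definition above) =====
theorem calculate_grid_size_spec : Claim_equal_calculate_grid_size := by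
  intro n _
  unfold Spec_calculate_grid_size calculate_grid_size calculate_grid_size_alt
  by_cases h : n ≤ 0
  · simp [h]
  · have hpos : 0 < n.toNat := by omega
    have hr : 1 ≤ Nat.sqrt n.toNat := Nat.sqrt_pos.mpr hpos
    simp only [h, if_false]
    rw [pv_scan_eq n (Nat.sqrt n.toNat) hr]
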